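-- pv_equiv track=rewrite | github.com/kenzo-staelens/aoc | day14/day14.py | update_line_p2
-- ===== SOURCE A (Python) =====
-- def update_line_p2(line,length):
--     rock_at=0
--     result_str = ["."]*length
--     for i,item in enumerate(line):
--         if item=="#":
--             result_str[i]=item
--             rock_at=i+1
--             continue
--         if item=="O":
--             result_str[rock_at]=item
--             rock_at+=1
--     return "".join(result_str)
-- ===== SOURCE B (Python) =====
-- def update_line_p2(line, length):
--     pieces = []
--     for seg in line.split('#'):
--         c = seg.count('O')
--         pieces.append('O' * c + '.' * (len(seg) - c))
--     rolled = '#'.join(pieces)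
--     n = max(length, 0)
--     if len(rolled) < n:
--         return rolled + '.' * (n - len(rolled))
--     return rolled[:n]
-- ===== Notes on version B (the rewrite author's own statement) =====
-- stated objective: faster
-- what changed: B splits the line on '#' and rebuilds each segment at once as 'O'*count + '.'*rest joined with '#' (then pads/cuts to length), replacing A's per-character scan that threads a rock_at pointer through a pre-sized list.
import Mathlib
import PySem

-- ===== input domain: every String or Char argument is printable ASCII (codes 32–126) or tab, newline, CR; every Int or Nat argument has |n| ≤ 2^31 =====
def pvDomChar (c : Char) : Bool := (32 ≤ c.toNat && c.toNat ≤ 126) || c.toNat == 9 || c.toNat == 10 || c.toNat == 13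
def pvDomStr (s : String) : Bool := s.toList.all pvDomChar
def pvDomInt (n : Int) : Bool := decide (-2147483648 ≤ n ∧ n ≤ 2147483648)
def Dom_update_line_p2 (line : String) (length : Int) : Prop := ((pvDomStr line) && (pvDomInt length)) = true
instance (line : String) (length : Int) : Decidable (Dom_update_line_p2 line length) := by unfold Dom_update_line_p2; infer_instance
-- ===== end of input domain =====

-- B rolls each '#'-delimited segment in one go ('O' * count + '.' * rest, joined with '#')
-- instead of threading a rock pointer through a char-by-char scan (measurably faster in Python
-- via bulk string operations). Equivalence is claimed on Pre_, exactly the inputs where the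
-- Python A returns instead of raising IndexError.

-- ===== PORT A =====
-- the for-loop over enumerate(line): i = running index, rock = rock_at, res = result_str.
-- List.set is a no-op out of range; Python raises IndexError exactly there, which Pre_ excludes.
def pvLoopA : List Char → Nat → Nat → List Char → List Char
  | [], _, _, res => res
  | item :: rest, i, rock, res =>
    if item = '#' then pvLoopA rest (i + 1) (i + 1) (res.set i '#')
    else if item = 'O' then pvLoopA rest (i + 1) (rock + 1) (res.set rock 'O')
    else pvLoopA rest (i + 1) rock res

def update_line_p2 (line : String) (length : Int) : String :=
  String.ofList (pvLoopA line.toList 0 0 (PySem.List.pyRepeat ['.'] length))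

-- ===== PORT B =====
-- 'O' * seg.count('O') + '.' * (len(seg) - seg.count('O'))
def pvRollSeg (seg : List Char) : List Char :=
  let c := PySem.Chars.count seg ['O']
  List.replicate c 'O' ++ List.replicate (seg.length - c) '.'

def update_line_p2_alt (line : String) (length : Int) : String :=
  let pieces := (PySem.Chars.splitOn line.toList ['#']).foldl (fun acc seg => acc ++ [pvRollSeg seg]) []
  let rolled := PySem.Chars.join ['#'] pieces
  let n := max length 0
  if (rolled.length : Int) < n then
    String.ofList (rolled ++ List.replicate (n - (rolled.length : Int)).toNat '.')
  else
    String.ofList (PySem.List.slice rolled none (some n))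

-- ===== PRECONDITION & SPEC =====
-- proof-side single-char split mirroring str.split('#') (Pre_ may not mention the ports)
def pvSplit : List Char → List (List Char)
  | [] => [[]]
  | c :: rest =>
    if c = '#' then [] :: pvSplit rest
    else
      match pvSplit rest with
      | s :: ss => (c :: s) :: ss
      | [] => [[c]]

-- per '#'-delimited segment starting at index s: the rolled 'O's land at s .. s+count-1 and the
-- following '#' sits at s+|seg|; all these indices must be < length for A's writes to be in range
def pvPreSegs : List (List Char) → Int → Int → Bool
  | [], _, _ => true
  | seg :: rest, s, L =>
    ((seg.count 'O' == 0) || decide (s + (seg.count 'O' : Int) ≤ L)) &&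
    (rest.isEmpty || decide (s + (seg.length : Int) < L)) &&
    pvPreSegs rest (s + seg.length + 1) L

-- Pre_ holds exactly when every index assignment of A's loop is in range, i.e. exactly when the
-- Python A returns normally instead of raising IndexError.
def Pre_update_line_p2 (line : String) (length : Int) : Prop :=
  pvPreSegs (pvSplit line.toList) 0 length = true
instance (line : String) (length : Int) : Decidable (Pre_update_line_p2 line length) := by
  unfold Pre_update_line_p2; infer_instance

def pvWitness_update_line_p2 : String × Int := ("O.#..O", 8)

def Spec_update_line_p2 (line : String) (length : Int) (out : String) : Prop := out = update_line_p2_alt line length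
instance (line : String) (length : Int) (out : String) : Decidable (Spec_update_line_p2 line length out) := by unfold Spec_update_line_p2; infer_instance

-- ===== CLAIM (what is proved, stated in full; the proofs are below) =====
def Claim_equal_update_line_p2 : Prop := ∀ (line : String) (length : Int), Dom_update_line_p2 line length → Pre_update_line_p2 line length → Spec_update_line_p2 line length (update_line_p2 line length)


-- ===== LEMMAS AND PROOFS =====

-- xs cut/padded with '.' to exactly n characters
def pvPadTo (xs : List Char) (n : Nat) : List Char :=
  xs.take n ++ List.replicate (n - xs.length) '.'

-- write c 'O's at positions r, r+1, …
def pvWriteOs : List Char → Nat → Nat → List Char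
  | res, _, 0 => res
  | res, r, c + 1 => pvWriteOs (res.set r 'O') (r + 1) c

-- head-merge used to characterise the fuel-based PySem.Chars.splitOn.go
def pvConsHead (p : List Char) : List (List Char) → List (List Char)
  | s :: ss => (p ++ s) :: ss
  | [] => [p]

theorem pvSplit_ne_nil (cs : List Char) : pvSplit cs ≠ [] := by
  induction cs with
  | nil => simp [pvSplit]
  | cons c rest ih =>
    simp only [pvSplit]
    split
    · simp
    · split <;> simp_all

theorem pvSplit_no_hash (cs : List Char) : ∀ seg ∈ pvSplit cs, '#' ∉ seg := by
  induction cs with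
  | nil => simp [pvSplit]
  | cons c rest ih =>
    intro seg hseg
    simp only [pvSplit] at hseg
    split at hseg
    · rcases List.mem_cons.1 hseg with h | h
      · simp [h]
      · exact ih seg h
    · rename_i hc
      split at hseg
      · rename_i s ss hps
        rcases List.mem_cons.1 hseg with h | h
        · subst h
          intro hm
          rcases List.mem_cons.1 hm with h | h
          · exact hc h.symm
          · exact ih s (by rw [hps]; exact List.mem_cons_self ..) h
        · exact ih seg (by rw [hps]; exact List.mem_cons_of_mem _ h)
      · rename_i hps
        exact absurd hps (pvSplit_ne_nil rest)

theorem pvSplit_join (cs : List Char) : PySem.Chars.join ['#'] (pvSplit cs) = cs := by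
  induction cs with
  | nil => simp [pvSplit, PySem.Chars.join_singleton]
  | cons c rest ih =>
    simp only [pvSplit]
    split
    · rename_i hc
      subst hc
      rcases hps : pvSplit rest with _ | ⟨s, ss⟩
      · exact absurd hps (pvSplit_ne_nil rest)
      · rw [hps] at ih
        rw [PySem.Chars.join_cons_cons, ih]
        simp
    · rename_i hc
      rcases hps : pvSplit rest with _ | ⟨s, ss⟩
      · exact absurd hps (pvSplit_ne_nil rest)
      · rw [hps] at ih
        cases ss with
        | nil => simp_all [PySem.Chars.join_singleton]
        | cons t ts =>
          rw [PySem.Chars.join_cons_cons] at ih ⊢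
          simp [← ih]

theorem pvCountGo (s : List Char) : ∀ (fuel acc : Nat), s.length ≤ fuel →
    PySem.Chars.count.go ['O'] fuel s acc = acc + s.count 'O' := by
  induction s with
  | nil => intro fuel acc h; cases fuel <;> simp [PySem.Chars.count.go]
  | cons c rest ih =>
    intro fuel acc h
    cases fuel with
    | zero => simp at h
    | succ f =>
      simp only [PySem.Chars.count.go]
      by_cases hc : c = 'O'
      · subst hc
        simp only [List.isPrefixOf, List.instBEq, beq_self_eq_true, Bool.true_and]
        simp [ih f (acc+1) (by simpa using h), List.count_cons]
        omega
      · have : List.isPrefixOf ['O'] (c :: rest) = false := by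
          simp [List.isPrefixOf]; exact fun h => absurd h.symm hc
        rw [this]
        simp only [Bool.false_eq_true, if_false]
        simp [ih f acc (by simpa using h), List.count_cons, hc]

theorem pvCount_singleton (s : List Char) : PySem.Chars.count s ['O'] = s.count 'O' := by
  simp [PySem.Chars.count, pvCountGo s s.length 0 le_rfl]

theorem pvSplitGo (l : List Char) : ∀ (fuel : Nat) (cur : List Char) (acc : List (List Char)),
    l.length ≤ fuel →
    PySem.Chars.splitOn.go ['#'] fuel l cur acc
      = acc.reverse ++ pvConsHead cur.reverse (pvSplit l) := by
  induction l with
  | nil =>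
    intro fuel cur acc h
    cases fuel <;> simp [PySem.Chars.splitOn.go, pvSplit, pvConsHead]
  | cons c rest ih =>
    intro fuel cur acc h
    cases fuel with
    | zero => simp at h
    | succ f =>
      simp only [PySem.Chars.splitOn.go]
      by_cases hc : c = '#'
      · subst hc
        have hp : List.isPrefixOf ['#'] ('#' :: rest) = true := by simp [List.isPrefixOf]
        rw [hp]
        simp only [if_true, List.length_cons, List.drop_succ_cons, List.length_nil, List.drop_zero]
        rw [ih f [] (cur.reverse :: acc) (by simpa using h)]
        simp only [pvSplit, if_true, List.reverse_cons, List.reverse_nil]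
        rcases hps : pvSplit rest with _ | ⟨s, ss⟩
        · exact absurd hps (pvSplit_ne_nil rest)
        · simp [pvConsHead]
      · have hp : List.isPrefixOf ['#'] (c :: rest) = false := by
          simp [List.isPrefixOf]; exact fun h => absurd h.symm hc
        rw [hp]
        simp only [Bool.false_eq_true, if_false]
        rw [ih f (c :: cur) acc (by simpa using h)]
        simp only [pvSplit, hc, if_false, List.reverse_cons]
        rcases hps : pvSplit rest with _ | ⟨s, ss⟩ <;> simp [pvConsHead]

theorem pvPadTo_append (xs ys : List Char) (n : Nat) (h : xs.length ≤ n) :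
    pvPadTo (xs ++ ys) n = xs ++ pvPadTo ys (n - xs.length) := by
  simp [pvPadTo, List.take_append, List.take_of_length_le h]
  omega

theorem pvPadTo_dots (m n : Nat) : pvPadTo (List.replicate m '.') n = List.replicate n '.' := by
  simp [pvPadTo, List.take_replicate]
  omega

theorem pvPreSegs_mono (segs : List (List Char)) : ∀ (s L L' : Int), L ≤ L' →
    pvPreSegs segs s L = true → pvPreSegs segs s L' = true := by
  induction segs with
  | nil => intro s L L' h hp; rfl
  | cons seg rest ih =>
    intro s L L' h hp
    simp only [pvPreSegs, Bool.and_eq_true, Bool.or_eq_true] at hp ⊢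
    refine ⟨⟨?_, ?_⟩, ih _ L L' h hp.2⟩
    · rcases hp.1.1 with h1 | h1
      · exact Or.inl h1
      · exact Or.inr (by simp at h1 ⊢; omega)
    · rcases hp.1.2 with h1 | h1
      · exact Or.inl h1
      · exact Or.inr (by simp at h1 ⊢; omega)

theorem pvLoopA_no_hash (seg : List Char) (hs : '#' ∉ seg) :
    ∀ (tl : List Char) (i rock : Nat) (res : List Char),
    pvLoopA (seg ++ tl) i rock res
      = pvLoopA tl (i + seg.length) (rock + seg.count 'O') (pvWriteOs res rock (seg.count 'O')) := by
  induction seg with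
  | nil => intro tl i rock res; simp [pvWriteOs]
  | cons c rest ih =>
    intro tl i rock res
    have hc : ¬ c = '#' := fun h => hs (by simp [h])
    have hrest : '#' ∉ rest := fun h => hs (List.mem_cons_of_mem _ h)
    by_cases hO : c = 'O'
    · subst hO
      simp only [List.cons_append, pvLoopA, if_neg hc, if_pos rfl]
      rw [ih hrest]
      simp only [List.count_cons_self, pvWriteOs]
      have h1 : i + 1 + rest.length = i + (rest.length + 1) := by omega
      have h2 : rock + 1 + List.count 'O' rest = rock + (List.count 'O' rest + 1) := by omega
      rw [h1, h2]
      simp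
    · simp only [List.cons_append, pvLoopA, if_neg hc, if_neg hO]
      rw [ih hrest]
      have hcnt : List.count 'O' (c :: rest) = List.count 'O' rest := by simp [List.count_cons, hO]
      rw [hcnt]
      have h1 : i + 1 + rest.length = i + (rest.length + 1) := by omega
      rw [h1]
      rfl

theorem pvWriteOs_canon (c : Nat) : ∀ (pref : List Char) (L : Nat), pref.length + c ≤ L →
    pvWriteOs (pref ++ List.replicate (L - pref.length) '.') pref.length c
      = (pref ++ List.replicate c 'O') ++ List.replicate (L - (pref.length + c)) '.' := by
  induction c with
  | zero => intro pref L h; simp [pvWriteOs]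
  | succ c ih =>
    intro pref L h
    have hrep : List.replicate (L - pref.length) '.' = '.' :: List.replicate (L - pref.length - 1) '.' := by
      rw [← List.replicate_succ]; congr 1; omega
    rw [hrep]
    simp only [pvWriteOs]
    have hset : (pref ++ '.' :: List.replicate (L - pref.length - 1) '.').set pref.length 'O'
        = (pref ++ ['O']) ++ List.replicate (L - pref.length - 1) '.' := by
      rw [List.set_append_right _ _ (le_refl _)]
      simp
    rw [hset]
    have h2 : (pref ++ ['O']).length + c ≤ L := by simp; omega
    have h3 : L - (pref ++ ['O']).length = L - pref.length - 1 := by simp; omega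
    have := ih (pref ++ ['O']) L h2
    rw [h3] at this
    have h4 : (pref ++ ['O']).length = pref.length + 1 := by simp
    rw [← h4, this]
    simp [List.replicate_succ]
    omega

theorem pvSet_hash (xs : List Char) (m k : Nat) (hk : k < m) :
    (xs ++ List.replicate m '.').set (xs.length + k) '#'
      = (xs ++ List.replicate k '.' ++ ['#']) ++ List.replicate (m - k - 1) '.' := by
  have hrep : List.replicate m '.' = List.replicate k '.' ++ '.' :: List.replicate (m - k - 1) '.' := by
    rw [show m = k + (m - k - 1 + 1) by omega, List.replicate_add, List.replicate_succ]
    rw [show k + (m - k - 1 + 1) - k - 1 = m - k - 1 from by omega]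
  rw [hrep, List.set_append_right _ _ (by omega)]
  rw [List.set_append_right _ _ (by simp)]
  simp

theorem pvRollSeg_eq (seg : List Char) :
    pvRollSeg seg = List.replicate (seg.count 'O') 'O' ++ List.replicate (seg.length - seg.count 'O') '.' := by
  simp [pvRollSeg, pvCount_singleton]

theorem pvMain (L : Nat) :
    ∀ (segs : List (List Char)) (pref : List Char),
    segs ≠ [] → (∀ seg ∈ segs, '#' ∉ seg) → pref.length ≤ L →
    pvPreSegs segs (pref.length : Int) (L : Int) = true →
    pvLoopA (PySem.Chars.join ['#'] segs) pref.length pref.length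
        (pref ++ List.replicate (L - pref.length) '.')
      = pref ++ pvPadTo (PySem.Chars.join ['#'] (segs.map pvRollSeg)) (L - pref.length) := by
  intro segs
  induction segs with
  | nil => intro pref h; exact absurd rfl h
  | cons seg rest ih =>
    intro pref _ hnh hpL hpre
    simp only [pvPreSegs, Bool.and_eq_true, Bool.or_eq_true, beq_iff_eq, decide_eq_true_eq,
      List.isEmpty_iff] at hpre
    have hc_le : pref.length + seg.count 'O' ≤ L := by
      rcases hpre.1.1 with h | h
      · have := seg.count_le_length (a := 'O'); omega
      · omega
    rcases rest with _ | ⟨seg2, rs⟩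
    · -- last segment
      have hs : '#' ∉ seg := hnh seg (by simp)
      have h1 := pvLoopA_no_hash seg hs [] pref.length pref.length
        (pref ++ List.replicate (L - pref.length) '.')
      rw [List.append_nil] at h1
      rw [PySem.Chars.join_singleton, h1]
      simp only [pvLoopA]
      rw [pvWriteOs_canon _ _ _ hc_le]
      rw [List.map_cons, List.map_nil, PySem.Chars.join_singleton, pvRollSeg_eq]
      rw [pvPadTo_append _ _ _ (by simp [List.length_replicate]; omega)]
      rw [pvPadTo_dots]
      simp only [List.length_replicate, List.append_assoc]
      rw [show L - (pref.length + List.count 'O' seg) = L - pref.length - List.count 'O' seg from by omega]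
    · -- a '#' follows this segment
      have hs : '#' ∉ seg := hnh seg (by simp)
      have hhash : pref.length + seg.length < L := by
        rcases hpre.1.2 with h | h
        · simp at h
        · exact_mod_cast by push_cast at h ⊢; omega
      have hcs : seg.count 'O' ≤ seg.length := seg.count_le_length
      rw [PySem.Chars.join_cons_cons]
      have h1 := pvLoopA_no_hash seg hs ('#' :: PySem.Chars.join ['#'] (seg2 :: rs))
        pref.length pref.length (pref ++ List.replicate (L - pref.length) '.')
      rw [List.append_assoc, show ['#'] ++ PySem.Chars.join ['#'] (seg2 :: rs) = '#' :: PySem.Chars.join ['#'] (seg2 :: rs) from rfl]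
      rw [h1]
      simp only [pvLoopA, reduceIte]
      rw [pvWriteOs_canon _ _ _ hc_le]
      -- set the '#'
      have hset : ((pref ++ List.replicate (seg.count 'O') 'O') ++
            List.replicate (L - (pref.length + seg.count 'O')) '.').set (pref.length + seg.length) '#'
          = ((pref ++ List.replicate (seg.count 'O') 'O' ++
              List.replicate (seg.length - seg.count 'O') '.' ++ ['#'])) ++
            List.replicate (L - (pref.length + seg.length + 1)) '.' := by
        have hidx : pref.length + seg.length
            = (pref ++ List.replicate (seg.count 'O') 'O').length + (seg.length - seg.count 'O') := by
          simp only [List.length_append, List.length_replicate]; omega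
        rw [hidx, pvSet_hash _ _ _ (by omega)]
        simp only [List.append_assoc, List.length_append, List.length_replicate]
        rw [show L - (pref.length + List.count 'O' seg) - (seg.length - List.count 'O' seg) - 1
            = L - (pref.length + List.count 'O' seg + (seg.length - List.count 'O' seg) + 1) from by omega]
      rw [hset]
      set pref' : List Char := pref ++ List.replicate (seg.count 'O') 'O' ++
          List.replicate (seg.length - seg.count 'O') '.' ++ ['#'] with hpref'
      have hlen' : pref'.length = pref.length + seg.length + 1 := by
        simp [hpref', List.length_replicate]; omega
      have h2 := ih pref' (by simp) (fun t ht => hnh t (List.mem_cons_of_mem _ ht))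
        (by omega) (by rw [hlen']; push_cast; exact_mod_cast hpre.2)
      rw [show L - (pref.length + seg.length + 1) = L - pref'.length by omega] at *
      rw [show pref.length + seg.length + 1 = pref'.length by omega]
      rw [h2]
      -- right-hand side
      simp only [List.map_cons]
      rw [PySem.Chars.join_cons_cons]
      have hlenroll : (pvRollSeg seg).length = seg.length := by
        rw [pvRollSeg_eq]; simp only [List.length_append, List.length_replicate]; omega
      rw [pvPadTo_append (pvRollSeg seg ++ ['#']) _ _
        (by simp only [List.length_append, hlenroll, List.length_cons, List.length_nil]; omega)]
      have hL2 : L - pref.length - (pvRollSeg seg ++ ['#']).length = L - pref'.length := by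
        simp only [List.length_append, hlenroll, List.length_cons, List.length_nil]; omega
      rw [hL2, hpref']
      simp [pvRollSeg_eq, List.append_assoc]

theorem pvSplitOn_eq (cs : List Char) : PySem.Chars.splitOn cs ['#'] = pvSplit cs := by
  rw [PySem.Chars.splitOn, pvSplitGo cs (cs.length + 1) [] [] (by omega)]
  rcases h : pvSplit cs with _ | ⟨s, ss⟩
  · exact absurd h (pvSplit_ne_nil cs)
  · simp [pvConsHead]

theorem pvAltShape (line : String) (length : Int) :
    update_line_p2_alt line length
      = String.ofList (pvPadTo (PySem.Chars.join ['#'] ((pvSplit line.toList).map pvRollSeg)) length.toNat) := by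
  unfold update_line_p2_alt
  rw [pvSplitOn_eq, PySem.List.foldl_append_singleton_eq_map]
  simp only [List.nil_append]
  have hMt : (max length 0) = ((length.toNat : Nat) : Int) := by
    rcases le_total length 0 with hl | hl
    · rw [max_eq_right hl]; omega
    · rw [max_eq_left hl]; omega
  rw [hMt]
  set J := PySem.Chars.join ['#'] ((pvSplit line.toList).map pvRollSeg) with hJ
  by_cases h : (J.length : Int) < ((length.toNat : Nat) : Int)
  · rw [if_pos h]
    unfold pvPadTo
    rw [List.take_of_length_le (by omega)]
    rw [show ((length.toNat : Int) - (J.length : Int)).toNat = length.toNat - J.length from by omega]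
  · rw [if_neg h]
    rw [PySem.List.slice_to _ (by omega)]
    unfold pvPadTo
    have h1 : length.toNat ≤ J.length := by omega
    rw [show ((length.toNat : Nat) : Int).toNat = length.toNat from by omega, show length.toNat - J.length = 0 from by omega]
    simp



theorem pvFinal (line : String) (length : Int) (hpre : pvPreSegs (pvSplit line.toList) 0 length = true) :
    update_line_p2 line length = update_line_p2_alt line length := by
  rw [pvAltShape]
  unfold update_line_p2
  rw [PySem.List.pyRepeat_singleton]
  have hnil : pvSplit line.toList ≠ [] := pvSplit_ne_nil _
  have hpre' : pvPreSegs (pvSplit line.toList) ((([] : List Char).length : Nat) : Int) ((length.toNat : Nat) : Int) = true := by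
    simp only [List.length_nil, Nat.cast_zero]
    exact pvPreSegs_mono _ 0 length (length.toNat : Int) (Int.self_le_toNat _) hpre
  have := pvMain length.toNat (pvSplit line.toList) [] hnil (pvSplit_no_hash _) (by simp) hpre'
  rw [pvSplit_join] at this
  simp only [List.nil_append, List.length_nil, Nat.sub_zero] at this
  rw [this]

-- ===== VERDICT (by name: the statement is the Claim_ definition above) =====
theorem update_line_p2_spec : Claim_equal_update_line_p2 := by
  intro line length _ hpre
  unfold Spec_update_line_p2
  exact pvFinal line length hpre
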